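-- pv_equiv track=rewrite | github.com/JuanCorredor2310/App_Vanti | Codigo/archivo_graficas.py | cambio_matriz_AOM
-- ===== SOURCE A (Python) =====
-- def cambio_matriz_AOM(matriz):
--     nueva_matriz = []
--     for i in range(len(matriz)):
--         lista = []
--         for j in range(len(matriz[0])):
--             if i == 0:
--                 lista.append(matriz[i][j])
--             else:
--                 lista.append(nueva_matriz[i-1][j]+matriz[i][j])
--         nueva_matriz.append(lista)
--     return nueva_matriz
-- ===== SOURCE B (Python) =====
-- def cambio_matriz_AOM(matriz):
--     # Transpose, take 1-D prefix sums of each column, transpose back.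
--     if not matriz:
--         return []
--     w = len(matriz[0])
--     n = len(matriz)
--     cols = []
--     for j in range(w):
--         col = []
--         s = 0
--         for i in range(n):
--             s += matriz[i][j]
--             col.append(s)
--         cols.append(col)
--     return [[cols[j][i] for j in range(w)] for i in range(n)]
-- ===== Notes on version B (the rewrite author's own statement) =====
-- stated objective: alternative
-- what changed: B traverses the matrix column-major: it builds each column's 1-D running-sum list independently and then transposes the column lists back into rows, instead of A's row-major double loop that reads back the previously appended output row.
import Mathlib
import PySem

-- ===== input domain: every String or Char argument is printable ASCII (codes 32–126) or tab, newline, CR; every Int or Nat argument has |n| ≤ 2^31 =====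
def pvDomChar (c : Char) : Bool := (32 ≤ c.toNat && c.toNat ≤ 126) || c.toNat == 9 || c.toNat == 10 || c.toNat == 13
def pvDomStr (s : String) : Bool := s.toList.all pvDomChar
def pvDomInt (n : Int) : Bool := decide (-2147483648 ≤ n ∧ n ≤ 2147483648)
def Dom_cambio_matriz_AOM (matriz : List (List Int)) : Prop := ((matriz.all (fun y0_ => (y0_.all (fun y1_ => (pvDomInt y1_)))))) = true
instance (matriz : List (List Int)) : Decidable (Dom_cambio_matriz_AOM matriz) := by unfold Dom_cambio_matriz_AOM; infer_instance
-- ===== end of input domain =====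

-- B computes the same column-wise cumulative sums column-major (transpose, 1-D prefix
-- sums per column, transpose back) instead of A's row-major loop reading back the
-- previous output row; same cost, a genuinely different traversal.

-- ===== PORT A =====
-- literal port of A: outer loop over range(len(matriz)), inner loop over
-- range(len(matriz[0])), appending to lists; i == 0 branch first.
def cambio_matriz_AOM (matriz : List (List Int)) : List (List Int) :=
  (PySem.List.pyRange 0 matriz.length 1).foldl (fun nueva i =>
    let lista := (PySem.List.pyRange 0 (PySem.List.pyGetD matriz 0 []).length 1).foldl
      (fun lista j =>
        if i = 0 then
          lista ++ [PySem.List.pyGetD (PySem.List.pyGetD matriz i []) j 0]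
        else
          lista ++ [PySem.List.pyGetD (PySem.List.pyGetD nueva (i - 1) []) j 0 +
                    PySem.List.pyGetD (PySem.List.pyGetD matriz i []) j 0]) []
    nueva ++ [lista]) []

-- ===== PORT B =====
-- literal port of Source B: build cols (each column's running-sum list, inner loop with
-- accumulator s and col.append), then the transposing double comprehension.
def cambio_matriz_AOM_alt (matriz : List (List Int)) : List (List Int) :=
  if matriz = [] then []
  else
    let w := (matriz.headD []).length
    let n := matriz.length
    let cols := (PySem.List.pyRange 0 w 1).foldl (fun cols j =>
      cols ++ [((PySem.List.pyRange 0 n 1).foldl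
        (fun (st : List Int × Int) i =>
          let s := st.2 + PySem.List.pyGetD (PySem.List.pyGetD matriz i []) j 0
          (st.1 ++ [s], s)) ([], 0)).1]) []
    (PySem.List.pyRange 0 n 1).map (fun i =>
      (PySem.List.pyRange 0 w 1).map (fun j =>
        PySem.List.pyGetD (PySem.List.pyGetD cols j []) i 0))

-- ===== PRECONDITION & SPEC =====
-- Pre_ excludes exactly the ragged inputs where some row is shorter than the first
-- row: there Python A (and Python B) raise IndexError.
def Pre_cambio_matriz_AOM (matriz : List (List Int)) : Prop :=
  ∀ row ∈ matriz, (matriz.headD []).length ≤ row.length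
instance (matriz : List (List Int)) : Decidable (Pre_cambio_matriz_AOM matriz) := by
  unfold Pre_cambio_matriz_AOM; infer_instance
def pvWitness_cambio_matriz_AOM : List (List Int) := [[1, 2], [3, 4], [5, 6]]

def Spec_cambio_matriz_AOM (matriz : List (List Int)) (out : List (List Int)) : Prop := out = cambio_matriz_AOM_alt matriz
instance (matriz : List (List Int)) (out : List (List Int)) : Decidable (Spec_cambio_matriz_AOM matriz out) := by unfold Spec_cambio_matriz_AOM; infer_instance

-- ===== CLAIM (what is proved, stated in full; the proofs are below) =====
def Claim_equal_cambio_matriz_AOM : Prop := ∀ (matriz : List (List Int)), Dom_cambio_matriz_AOM matriz → Pre_cambio_matriz_AOM matriz → Spec_cambio_matriz_AOM matriz (cambio_matriz_AOM matriz)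

-- ===== LEMMAS AND PROOFS =====

-- the common target: S m i j = sum of column j over rows 0..i (rows read with getD)
def S (m : List (List Int)) : Nat → Nat → Int
  | 0, j => (m.getD 0 []).getD j 0
  | i+1, j => S m i j + (m.getD (i+1) []).getD j 0

-- proof-side description of one step of A's recurrence
def csStep (w : Nat) (acum fila : List Int) : List Int :=
  (PySem.List.pyRange 0 w 1).map
    (fun j => PySem.List.pyGetD acum j 0 + PySem.List.pyGetD fila j 0)

def cs (w : Nat) (a : List Int) : List (List Int) → List (List Int)
  | [] => []
  | r :: rs => csStep w a r :: cs w (csStep w a r) rs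

def csLast (w : Nat) (a : List Int) (rows : List (List Int)) : List Int :=
  rows.foldl (csStep w) a

lemma cs_append_single (w : Nat) : ∀ (rows : List (List Int)) (a r : List Int),
    cs w a (rows ++ [r]) = cs w a rows ++ [csStep w (csLast w a rows) r] := by
  intro rows
  induction rows with
  | nil => intro a r; simp [cs, csLast]
  | cons x xs ih => intro a r; simp [cs, csLast] at ih ⊢; rw [ih]

lemma cons_cs_getD_last (w : Nat) : ∀ (rows : List (List Int)) (a : List Int),
    (a :: cs w a rows).getD rows.length [] = csLast w a rows := by
  intro rows
  induction rows with
  | nil => intro a; simp [cs, csLast]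
  | cons r rs ih => intro a; simp [cs, csLast] at ih ⊢; exact ih (csStep w a r)

lemma csStep_self (first : List Int) :
    (PySem.List.pyRange 0 first.length 1).map (fun j => PySem.List.pyGetD first j 0)
    = first := by
  rw [PySem.List.pyRange_one]
  simp only [Int.sub_zero, Int.toNat_natCast, Int.zero_add]
  apply List.ext_getElem
  · simp
  · intro i h1 h2
    simp [PySem.List.pyGetD_natCast, List.getD_eq_getElem?_getD,
      List.getElem?_eq_getElem h2]

-- A's inner loop, row 0
lemma a_row_zero (first : List Int) (rest : List (List Int)) :
    ((PySem.List.pyRange 0 (PySem.List.pyGetD (first :: rest) 0 []).length 1).foldl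
      (fun lista j =>
        lista ++ [PySem.List.pyGetD (PySem.List.pyGetD (first :: rest) (0 : Int) []) j 0]) [])
    = first := by
  rw [PySem.List.foldl_append_singleton_eq_map]
  simpa [PySem.List.pyGetD_zero_cons] using csStep_self first

-- A's outer loop over the first n+1 indices builds first :: cs of the first n rest rows
lemma a_fold_characterization (first : List Int) (rest : List (List Int)) :
    ∀ n, n ≤ rest.length →
    ((PySem.List.pyRange 0 ((n : Int) + 1) 1).foldl (fun nueva i =>
      let lista := (PySem.List.pyRange 0 (PySem.List.pyGetD (first :: rest) 0 []).length 1).foldl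
        (fun lista j =>
          if i = 0 then
            lista ++ [PySem.List.pyGetD (PySem.List.pyGetD (first :: rest) i []) j 0]
          else
            lista ++ [PySem.List.pyGetD (PySem.List.pyGetD nueva (i - 1) []) j 0 +
                      PySem.List.pyGetD (PySem.List.pyGetD (first :: rest) i []) j 0]) []
      nueva ++ [lista]) [])
    = first :: cs first.length first (rest.take n) := by
  intro n
  induction n with
  | zero =>
    intro _
    have h01 : PySem.List.pyRange 0 ((0 : Int) + 1) 1 = [0] := by decide
    simp only [Nat.cast_zero, h01, List.foldl_cons, List.foldl_nil]
    simpa [cs, PySem.List.pyGetD_zero_cons] using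
      congrArg (fun l => ([] : List (List Int)) ++ [l]) (a_row_zero first rest)
  | succ n ih =>
    intro hn
    have hn' : n ≤ rest.length := Nat.le_of_succ_le hn
    have hsplit : PySem.List.pyRange 0 ((↑(n + 1) : Int) + 1) 1
        = PySem.List.pyRange 0 ((n : Int) + 1) 1 ++ [((n : Int) + 1)] := by
      have := PySem.List.pyRange_one_succ_right (a := 0) (b := (n : Int) + 1) (by positivity)
      push_cast at this ⊢
      convert this using 2
    rw [hsplit, List.foldl_append, ih hn']
    simp only [List.foldl_cons, List.foldl_nil]
    have hne : ¬ ((n : Int) + 1 = 0) := by omega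
    simp only [if_neg hne]
    rw [PySem.List.foldl_append_singleton_eq_map]
    have hnlt : n < rest.length := hn
    have hprev : PySem.List.pyGetD (first :: cs first.length first (rest.take n)) ((n : Int) + 1 - 1) []
        = csLast first.length first (rest.take n) := by
      rw [show ((n : Int) + 1 - 1) = (n : Int) by ring, PySem.List.pyGetD_natCast]
      have h := cons_cs_getD_last first.length (rest.take n) first
      rwa [show (rest.take n).length = n by simp [hn']] at h
    have hcur : PySem.List.pyGetD (first :: rest) ((n : Int) + 1) [] = rest[n] := by
      rw [show ((n : Int) + 1) = ((n + 1 : Nat) : Int) by push_cast; ring,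
        PySem.List.pyGetD_natCast]
      simp [List.getD_eq_getElem?_getD, List.getElem?_eq_getElem hnlt]
    rw [hprev, hcur]
    rw [List.take_add_one, List.getElem?_eq_getElem hnlt]
    simp only [Option.toList_some]
    rw [cs_append_single]
    simp [csStep, PySem.List.pyGetD_zero_cons]

-- csStep in List.range form and its elements
lemma csStep_eq_map_range (w : Nat) (a r : List Int) :
    csStep w a r = (List.range w).map (fun j => a.getD j 0 + r.getD j 0) := by
  unfold csStep
  rw [PySem.List.pyRange_one]
  simp [List.map_map, Function.comp, PySem.List.pyGetD_natCast]

lemma csStep_getD (w : Nat) (a r : List Int) {j : Nat} (hj : j < w) :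
    (csStep w a r).getD j 0 = a.getD j 0 + r.getD j 0 := by
  rw [csStep_eq_map_range, PySem.List.getD_map_range _ _ _ _ hj]

lemma csStep_length (w : Nat) (a r : List Int) : (csStep w a r).length = w := by
  rw [csStep_eq_map_range]; simp

lemma map_range_getD_self (a : List Int) :
    (List.range a.length).map (fun j => a.getD j 0) = a := by
  apply List.ext_getElem
  · simp
  · intro i h1 h2
    simp [List.getD_eq_getElem?_getD, List.getElem?_eq_getElem h2]

-- shifting the S recursion past an absorbed first row
lemma S_shift (w : Nat) (a r : List Int) (rs : List (List Int)) :
    ∀ i j, j < w → S (a :: r :: rs) (i + 1) j = S (csStep w a r :: rs) i j := by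
  intro i
  induction i with
  | zero =>
    intro j hj
    show S (a :: r :: rs) 0 j + ((a :: r :: rs).getD 1 []).getD j 0
        = ((csStep w a r :: rs).getD 0 []).getD j 0
    show (a.getD j 0) + (r.getD j 0) = (csStep w a r).getD j 0
    rw [csStep_getD w a r hj]
  | succ i ih =>
    intro j hj
    show S (a :: r :: rs) (i + 1) j + _ = S (csStep w a r :: rs) i j + _
    rw [ih j hj]
    rfl

-- A's result rows are exactly the prefix-sum values S
lemma cs_eq_map (w : Nat) : ∀ (rows : List (List Int)) (a : List Int), a.length = w →
    a :: cs w a rows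
    = (List.range (rows.length + 1)).map
        (fun i => (List.range w).map (fun j => S (a :: rows) i j)) := by
  intro rows
  induction rows with
  | nil =>
    intro a ha
    show [a] = [(List.range w).map (fun j => S [a] 0 j)]
    have h1 : (List.range w).map (fun j => S [a] 0 j)
        = (List.range w).map (fun j => a.getD j 0) :=
      List.map_congr_left (fun j _ => rfl)
    rw [h1, ← ha, map_range_getD_self]
  | cons r rs ih =>
    intro a ha
    have ha' := csStep_length w a r
    have htail : (List.range (rs.length + 1)).map
        (fun i => (List.range w).map (fun j => S (a :: r :: rs) (i + 1) j))
        = (List.range (rs.length + 1)).map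
        (fun i => (List.range w).map (fun j => S (csStep w a r :: rs) i j)) := by
      apply List.map_congr_left; intro i _
      apply List.map_congr_left; intro j hj
      exact S_shift w a r rs i j (List.mem_range.mp hj)
    have hhead : (List.range w).map (fun j => S (a :: r :: rs) 0 j) = a := by
      have h1 : (List.range w).map (fun j => S (a :: r :: rs) 0 j)
          = (List.range w).map (fun j => a.getD j 0) :=
        List.map_congr_left (fun j _ => rfl)
      rw [h1, ← ha, map_range_getD_self]
    calc a :: cs w a (r :: rs)
        = a :: (csStep w a r :: cs w (csStep w a r) rs) := rfl
      _ = a :: (List.range (rs.length + 1)).map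
            (fun i => (List.range w).map (fun j => S (csStep w a r :: rs) i j)) := by
          rw [ih (csStep w a r) ha']
      _ = a :: (List.range (rs.length + 1)).map
            (fun i => (List.range w).map (fun j => S (a :: r :: rs) (i + 1) j)) := by
          rw [htail]
      _ = (List.range ((r :: rs).length + 1)).map
            (fun i => (List.range w).map (fun j => S (a :: r :: rs) i j)) := by
          have hsplit : (List.range (rs.length + 1 + 1)).map
              (fun i => (List.range w).map (fun j => S (a :: r :: rs) i j))
              = ((List.range w).map (fun j => S (a :: r :: rs) 0 j))
                :: (List.range (rs.length + 1)).map
                  (fun i => (List.range w).map (fun j => S (a :: r :: rs) (i + 1) j)) := by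
            rw [List.range_succ_eq_map, List.map_cons, List.map_map]
            rfl
          rw [List.length_cons, hsplit, hhead]

-- B's inner loop: column j's running-sum list and its final accumulator
def colSum (m : List (List Int)) (j : Nat) : Nat → Int
  | 0 => 0
  | n+1 => S m n j

lemma colSum_step (m : List (List Int)) (j n : Nat) :
    colSum m j (n + 1) = colSum m j n + (m.getD n []).getD j 0 := by
  cases n with
  | zero => simp [colSum, S]
  | succ n => rfl

lemma b_col_fold (m : List (List Int)) (j : Nat) : ∀ (n : Nat),
    ((PySem.List.pyRange 0 (n : Int) 1).foldl
      (fun (st : List Int × Int) i =>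
        (st.1 ++ [st.2 + PySem.List.pyGetD (PySem.List.pyGetD m i []) (j : Int) 0],
         st.2 + PySem.List.pyGetD (PySem.List.pyGetD m i []) (j : Int) 0)) ([], 0))
    = ((List.range n).map (fun i => S m i j), colSum m j n) := by
  intro n
  induction n with
  | zero => simp [colSum]
  | succ n ih =>
    have hsplit : PySem.List.pyRange 0 ((n + 1 : Nat) : Int) 1
        = PySem.List.pyRange 0 (n : Int) 1 ++ [(n : Int)] := by
      have := PySem.List.pyRange_one_succ_right (a := 0) (b := (n : Int)) (by positivity)
      push_cast at this ⊢
      convert this using 2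
    rw [hsplit, List.foldl_append, ih]
    simp only [List.foldl_cons, List.foldl_nil, PySem.List.pyGetD_natCast]
    have hs : colSum m j n + (m.getD n []).getD j 0 = S m n j := by
      rw [← colSum_step]; rfl
    simp only [hs]
    rw [List.range_succ, List.map_append]
    rfl

-- B's cols list, as a map over column indices
lemma b_cols (m : List (List Int)) (w n : Nat) :
    ((PySem.List.pyRange 0 (w : Int) 1).foldl (fun cols j =>
      cols ++ [((PySem.List.pyRange 0 (n : Int) 1).foldl
        (fun (st : List Int × Int) i =>
          let s := st.2 + PySem.List.pyGetD (PySem.List.pyGetD m i []) j 0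
          (st.1 ++ [s], s)) ([], 0)).1]) [])
    = (List.range w).map (fun j => (List.range n).map (fun i => S m i j)) := by
  rw [PySem.List.foldl_append_singleton_eq_map, List.nil_append,
    PySem.List.pyRange_one (a := 0) (b := (w : Int))]
  simp only [Int.sub_zero, Int.toNat_natCast, Int.zero_add, List.map_map]
  apply List.map_congr_left
  intro k _
  simp only [Function.comp_apply]
  rw [b_col_fold m k n]

-- B equals the common map form
lemma alt_eq_map (first : List Int) (rest : List (List Int)) :
    cambio_matriz_AOM_alt (first :: rest)
    = (List.range (rest.length + 1)).map
        (fun i => (List.range first.length).map (fun j => S (first :: rest) i j)) := by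
  unfold cambio_matriz_AOM_alt
  rw [if_neg (List.cons_ne_nil first rest)]
  simp only [List.headD_cons, List.length_cons]
  rw [show ((rest.length + 1 : Nat) : Int) = ((rest.length : Int) + 1) by push_cast; ring]
  rw [show ((rest.length : Int) + 1) = ((rest.length + 1 : Nat) : Int) by push_cast; ring]
  rw [b_cols (first :: rest) first.length (rest.length + 1)]
  rw [PySem.List.pyRange_one (a := 0) (b := ((rest.length + 1 : Nat) : Int))]
  simp only [Int.sub_zero, Int.toNat_natCast, Int.zero_add, List.map_map]
  apply List.map_congr_left
  intro i hi
  simp only [Function.comp]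
  rw [PySem.List.pyRange_one (a := 0) (b := (first.length : Int))]
  simp only [Int.sub_zero, Int.toNat_natCast, Int.zero_add, List.map_map]
  apply List.map_congr_left
  intro j hj
  simp only [Function.comp]
  simp only [PySem.List.pyGetD_natCast]
  rw [PySem.List.getD_map_range _ _ _ _ (List.mem_range.mp hj),
    PySem.List.getD_map_range _ _ _ _ (List.mem_range.mp hi)]

-- ===== VERDICT (by name: the statement is the Claim_ definition above) =====
theorem cambio_matriz_AOM_spec : Claim_equal_cambio_matriz_AOM := by
  intro matriz _ _
  unfold Spec_cambio_matriz_AOM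
  cases matriz with
  | nil => decide
  | cons first rest =>
    rw [alt_eq_map, ← cs_eq_map first.length rest first rfl]
    have h := a_fold_characterization first rest rest.length le_rfl
    rw [List.take_length] at h
    unfold cambio_matriz_AOM
    simp only [List.length_cons]
    rw [show ((rest.length + 1 : Nat) : Int) = (rest.length : Int) + 1 by push_cast; ring]
    exact h
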